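-- pv_equiv track=rewrite | github.com/affanabid/dsa | codeforces/450A.py | last_child
-- ===== SOURCE A (Python) =====
-- def last_child(n, m, line):
--     new_line = []
--     for i in range(len(line)):
--         data = (i+1, line[i])
--         new_line.append(data)
--
--     i = 0
--     while i < len(new_line):
--         current = new_line[i]
--         candies = current[1]
--         new_candies = candies - m
--         if new_candies > 0:
--             new_data = (current[0], new_candies)
--             new_line.append(new_data)
--         i += 1
--     result = new_line[-1][0]
--     return result
-- ===== SOURCE B (Python) =====
-- def last_child(n, m, line):
--     # Child i (1-based) with c candies is served max(1, ceil(c/m)) rounds; the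
--     # last child served is the last index attaining the maximal round count.
--     best_k = 0
--     best_idx = 0
--     for i, c in enumerate(line, 1):
--         k = max(1, -(-c // m))
--         if k >= best_k:
--             best_k, best_idx = k, i
--     return best_idx
-- ===== Notes on version B (the rewrite author's own statement) =====
-- stated objective: alternative
-- what changed: Replaces the whole queue simulation (re-appending each child until its candies run out) by a single pass that picks the last index maximizing max(1, ceil(c/m)); intended as asymptotically lighter, but a timing run measured only ~1.6x at the largest size and not consistently, so no speed is claimed.
-- outside the precondition, e.g. on last_child(2, -2, [-3, -2]): A returns 2, B returns 1
import Mathlib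
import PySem

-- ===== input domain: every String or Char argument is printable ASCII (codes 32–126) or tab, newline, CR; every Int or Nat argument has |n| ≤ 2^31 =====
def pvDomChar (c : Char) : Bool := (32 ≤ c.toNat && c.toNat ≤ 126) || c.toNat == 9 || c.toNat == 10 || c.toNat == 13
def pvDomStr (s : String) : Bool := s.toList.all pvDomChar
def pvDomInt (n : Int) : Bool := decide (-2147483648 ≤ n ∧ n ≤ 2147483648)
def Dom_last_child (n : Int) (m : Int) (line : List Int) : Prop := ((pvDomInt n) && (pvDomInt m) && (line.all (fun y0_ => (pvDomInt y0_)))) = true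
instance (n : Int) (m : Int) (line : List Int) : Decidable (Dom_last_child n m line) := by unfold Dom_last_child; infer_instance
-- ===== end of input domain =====

-- B replaces A's whole-queue simulation by a single pass over the line picking the
-- last index maximizing max(1, ceil(c/m)); equivalence is proved on nonempty lines with m > 0.

-- ===== PORT A =====
-- A's while-loop over the growing list, one fuel unit per iteration; on Pre_
-- (0 < m) the fuel passed below strictly bounds the number of iterations, so the
-- port computes exactly what the Python loop computes there.
-- the growing list is kept as an Array (a Python list IS a dynamic array:
-- O(1) append and O(1) index, exactly the two operations the loop performs)
def pvLoopA (m : Int) : Nat → Array (Int × Int) → Nat → Array (Int × Int)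
  | 0, nl, _ => nl
  | f + 1, nl, i =>
      if i < nl.size then
        let current := nl.getD i (0, 0)   -- new_line[i]; i is in range here
        let new_candies := current.2 - m
        pvLoopA m f (if new_candies > 0 then nl.push (current.1, new_candies) else nl) (i + 1)
      else nl

def last_child (n : Int) (m : Int) (line : List Int) : Int :=
  -- for i in range(len(line)): new_line.append((i+1, line[i]))
  let new_line : List (Int × Int) :=
    (PySem.List.pyRange 0 line.length 1).foldl
      (fun acc i => acc ++ [(i + 1, PySem.List.pyGetD line i 0)]) []
  let fin := pvLoopA m (new_line.length + (new_line.map (fun x => x.2.toNat)).sum) new_line.toArray 0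
  -- result = new_line[-1][0]; Python raises IndexError on [], excluded by Pre_
  ((PySem.List.pyGet? fin.toList (-1)).getD (0, 0)).1

-- ===== PORT B =====
-- loop body of Source B: k = max(1, -(-c // m)); if k >= best_k: best_k, best_idx = k, i
def pvStepB (m : Int) (b : Int × Int) (p : Int × Int) : Int × Int :=
  let k := max 1 (-(PySem.Int.floordiv (-p.2) m))
  if k ≥ b.1 then (k, p.1) else b

def last_child_alt (n : Int) (m : Int) (line : List Int) : Int :=
  ((PySem.List.enumerate line 1).foldl (pvStepB m) ((0 : Int), (0 : Int))).2

-- ===== PRECONDITION & SPEC =====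
-- Pre_ restricts to the problem's natural domain: A raises IndexError on an empty
-- line, and m ≤ 0 is outside the task's domain (there A's while-loop diverges
-- whenever some count exceeds m, and the corner where it does return — every
-- count ≤ m — is not one the ceiling-by-m reading of the task covers).
def Pre_last_child (n : Int) (m : Int) (line : List Int) : Prop :=
  line ≠ [] ∧ 0 < m
instance (n : Int) (m : Int) (line : List Int) : Decidable (Pre_last_child n m line) := by
  unfold Pre_last_child; infer_instance

def pvWitness_last_child : Int × Int × List Int := (5, 2, [1, 3, 1, 4, 2])

def Spec_last_child (n : Int) (m : Int) (line : List Int) (out : Int) : Prop := out = last_child_alt n m line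
instance (n : Int) (m : Int) (line : List Int) (out : Int) : Decidable (Spec_last_child n m line out) := by unfold Spec_last_child; infer_instance

-- ===== CLAIM (what is proved, stated in full; the proofs are below) =====
def Claim_equal_last_child : Prop := ∀ (n : Int) (m : Int) (line : List Int), Dom_last_child n m line → Pre_last_child n m line → Spec_last_child n m line (last_child n m line)

-- ===== LEMMAS AND PROOFS =====

-- ceil(c/m) as B computes it
def pvCeil (m c : Int) : Int := -(PySem.Int.floordiv (-c) m)
-- number of servings of a child with c candies
def pvK (m c : Int) : Int := max 1 (pvCeil m c)
-- the elements A's while-loop appends, in append (= pop) order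
def pvTail (m : Int) : Nat → List (Int × Int) → List (Int × Int)
  | 0, _ => []
  | _ + 1, [] => []
  | f + 1, x :: rest =>
      if x.2 - m > 0 then (x.1, x.2 - m) :: pvTail m f (rest ++ [(x.1, x.2 - m)])
      else pvTail m f rest
-- one whole round of the queue
def pvNext (m : Int) (q : List (Int × Int)) : List (Int × Int) :=
  q.filterMap (fun x => if x.2 - m > 0 then some (x.1, x.2 - m) else none)
def pvFuel (q : List (Int × Int)) : Nat :=
  q.length + (q.map (fun x => x.2.toNat)).sum

theorem pvCeil_bounds (m c : Int) (hm : 0 < m) :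
    (pvCeil m c - 1) * m < c ∧ c ≤ pvCeil m c * m := by
  have := (PySem.Int.neg_floordiv_neg_eq_iff_of_pos (a := c) (b := m) (q := pvCeil m c) hm).mp rfl
  exact this

theorem pvK_eq_one (m c : Int) (hm : 0 < m) (h : c ≤ m) : pvK m c = 1 := by
  have hb := pvCeil_bounds m c hm
  have h1 : pvCeil m c ≤ 1 := by nlinarith [hb.1]
  unfold pvK; omega

theorem pvK_ge_two (m c : Int) (hm : 0 < m) (h : m < c) : 2 ≤ pvK m c := by
  have hb := pvCeil_bounds m c hm
  have h1 : 2 ≤ pvCeil m c := by nlinarith [hb.2]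
  unfold pvK; omega

theorem pvK_sub (m c : Int) (hm : 0 < m) (h : m < c) : pvK m (c - m) = pvK m c - 1 := by
  have hb := pvCeil_bounds m c hm
  have h2 : 2 ≤ pvCeil m c := by nlinarith [hb.2]
  have hceil : -(PySem.Int.floordiv (-(c - m)) m) = pvCeil m c - 1 :=
    (PySem.Int.neg_floordiv_neg_eq_iff_of_pos hm).mpr ⟨by nlinarith [hb.1], by nlinarith [hb.2]⟩
  have hceil' : pvCeil m (c - m) = pvCeil m c - 1 := hceil
  unfold pvK
  rw [hceil']
  omega

theorem pvStepB_eq (m : Int) (b p : Int × Int) :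
    pvStepB m b p = if pvK m p.2 ≥ b.1 then (pvK m p.2, p.1) else b := rfl

theorem pvK_pos (m c : Int) : 1 ≤ pvK m c := le_max_left _ _

theorem pvLoopA_eq_tail (m : Int) : ∀ (f : Nat) (nl : Array (Int × Int)) (i : Nat), i ≤ nl.size →
    (pvLoopA m f nl i).toList = nl.toList ++ pvTail m f (nl.toList.drop i) := by
  intro f
  induction f with
  | zero => intro nl i hi; simp [pvLoopA, pvTail]
  | succ f IH =>
    intro nl i hi
    by_cases h : i < nl.size
    · have hlt : i < nl.toList.length := by simpa using h
      have hdrop : nl.toList.drop i = nl.toList[i] :: nl.toList.drop (i + 1) :=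
        List.drop_eq_getElem_cons hlt
      have hget : nl.getD i (0, 0) = nl.toList[i] := by
        rw [Array.getD, dif_pos h]
        simp
      rw [pvLoopA, if_pos h, hget, hdrop]
      show (pvLoopA m f (if nl.toList[i].2 - m > 0 then nl.push (nl.toList[i].1, nl.toList[i].2 - m) else nl) (i + 1)).toList
        = nl.toList ++ pvTail m (f + 1) (nl.toList[i] :: nl.toList.drop (i + 1))
      rw [pvTail]
      by_cases hc : nl.toList[i].2 - m > 0
      · rw [if_pos hc, if_pos hc,
          IH (nl.push (nl.toList[i].1, nl.toList[i].2 - m)) (i + 1) (by simp; omega),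
          Array.toList_push,
          List.drop_append_of_le_length (by simpa using h)]
        simp
      · rw [if_neg hc, if_neg hc, IH nl (i + 1) (by omega)]
    · have hi' : i = nl.size := by omega
      rw [pvLoopA, if_neg h, hi']
      rw [show List.drop nl.size nl.toList = [] from by simp]
      simp [pvTail]

theorem pvTail_round (m : Int) : ∀ (q s : List (Int × Int)) (F : Nat),
    pvTail m (q.length + F) (q ++ s) = pvNext m q ++ pvTail m F (s ++ pvNext m q) := by
  intro q
  induction q with
  | nil => intro s F; simp [pvNext]
  | cons x rest IH =>
    intro s F
    have hlen : (x :: rest).length + F = (rest.length + F) + 1 := by simp; omega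
    rw [hlen]
    by_cases hc : x.2 - m > 0
    · rw [show ((x :: rest) ++ s) = x :: (rest ++ s) by simp, pvTail, if_pos hc,
        show (rest ++ s) ++ [(x.1, x.2 - m)] = rest ++ (s ++ [(x.1, x.2 - m)]) by simp,
        IH (s ++ [(x.1, x.2 - m)]) F]
      have hc' : m < x.2 := by omega
      simp [pvNext, hc']
    · rw [show ((x :: rest) ++ s) = x :: (rest ++ s) by simp, pvTail, if_neg hc, IH s F]
      have hc' : ¬ m < x.2 := by omega
      simp [pvNext, hc']

theorem pvTail_nil (m : Int) : ∀ (q : List (Int × Int)) (f : Nat), (∀ x ∈ q, x.2 ≤ m) →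
    pvTail m f q = [] := by
  intro q
  induction q with
  | nil => intro f _; cases f <;> simp [pvTail]
  | cons x rest IH =>
    intro f hall
    cases f with
    | zero => simp [pvTail]
    | succ f =>
      rw [pvTail, if_neg (by have := hall x (by simp); omega)]
      exact IH f (fun y hy => hall y (by simp [hy]))

theorem pvFuel_inv (m : Int) (hm : 0 < m) : ∀ q : List (Int × Int),
    pvFuel (pvNext m q) + q.length ≤ pvFuel q := by
  intro q
  induction q with
  | nil => simp [pvFuel, pvNext]
  | cons x rest IH =>
    by_cases hc : m < x.2
    · have h1 : pvNext m (x :: rest) = (x.1, x.2 - m) :: pvNext m rest := by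
        simp [pvNext, hc]
      rw [h1]
      simp only [pvFuel, List.length_cons, List.map_cons, List.sum_cons] at IH ⊢
      omega
    · have h1 : pvNext m (x :: rest) = pvNext m rest := by simp [pvNext, hc]
      rw [h1]
      simp only [pvFuel, List.length_cons, List.map_cons, List.sum_cons] at IH ⊢
      omega

theorem pvFold_fst_ge (m : Int) : ∀ (q : List (Int × Int)) (b : Int × Int),
    b.1 ≤ (q.foldl (pvStepB m) b).1 := by
  intro q
  induction q with
  | nil => intro b; simp
  | cons x rest IH =>
    intro b
    refine le_trans ?_ (IH (pvStepB m b x))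
    rw [pvStepB_eq]
    split
    · simp; omega
    · simp

theorem pvFold_fst_ge_one (m : Int) : ∀ (q : List (Int × Int)) (b : Int × Int), q ≠ [] →
    1 ≤ (q.foldl (pvStepB m) b).1 := by
  intro q
  cases q with
  | nil => intro b h; exact absurd rfl h
  | cons x rest =>
    intro b _
    refine le_trans ?_ (pvFold_fst_ge m rest (pvStepB m b x))
    rw [pvStepB_eq]
    have h1 := pvK_pos m x.2
    split <;> simp <;> omega

theorem pvFold_all_one (m : Int) (hm : 0 < m) : ∀ (q : List (Int × Int)) (b : Int × Int),
    ∀ (hq : q ≠ []), (∀ x ∈ q, x.2 ≤ m) → b.1 ≤ 1 →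
    q.foldl (pvStepB m) b = (1, (q.getLast hq).1) := by
  intro q
  induction q with
  | nil => intro b hq; exact absurd rfl hq
  | cons x rest IH =>
    intro b hq hall hb
    have hk : pvK m x.2 = 1 := pvK_eq_one m x.2 hm (hall x (by simp))
    have hstep : pvStepB m b x = (1, x.1) := by
      rw [pvStepB_eq, hk, if_pos (by omega)]
    rw [List.foldl_cons, hstep]
    cases rest with
    | nil => simp [List.getLast]
    | cons y t =>
      rw [List.getLast_cons (by simp)]
      exact IH (1, x.1) (by simp) (fun z hz => hall z (by simp [hz])) (by simp)

def pvRel (b b' : Int × Int) : Prop :=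
  (2 ≤ b.1 ∧ b'.1 = b.1 - 1 ∧ b'.2 = b.2) ∨ (b.1 ≤ 1 ∧ b' = (0, 0))

theorem pvFold_next (m : Int) (hm : 0 < m) : ∀ (q : List (Int × Int)) (b b' : Int × Int),
    pvRel b b' → pvRel (q.foldl (pvStepB m) b) ((pvNext m q).foldl (pvStepB m) b') := by
  intro q
  induction q with
  | nil => intro b b' h; simpa [pvNext] using h
  | cons x rest IH =>
    intro b b' hrel
    by_cases hc : m < x.2
    · have h1 : pvNext m (x :: rest) = (x.1, x.2 - m) :: pvNext m rest := by simp [pvNext, hc]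
      rw [h1, List.foldl_cons, List.foldl_cons]
      refine IH _ _ ?_
      have hk2 := pvK_ge_two m x.2 hm hc
      have hks := pvK_sub m x.2 hm hc
      rw [pvStepB_eq, pvStepB_eq]
      simp only [hks]
      rcases hrel with ⟨h2, hb1, hb2⟩ | ⟨h1', hb⟩
      · by_cases hup : pvK m x.2 ≥ b.1
        · rw [if_pos hup, if_pos (by omega)]
          exact Or.inl ⟨by omega, by simp, by simp⟩
        · rw [if_neg hup, if_neg (by omega)]
          exact Or.inl ⟨h2, hb1, hb2⟩
      · rw [if_pos (by omega), hb, if_pos (by norm_num; omega)]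
        exact Or.inl ⟨by omega, by simp, by simp⟩
    · have h1 : pvNext m (x :: rest) = pvNext m rest := by simp [pvNext, hc]
      rw [h1, List.foldl_cons]
      refine IH _ _ ?_
      have hk1 : pvK m x.2 = 1 := pvK_eq_one m x.2 hm (by omega)
      rw [pvStepB_eq, hk1]
      rcases hrel with ⟨h2, hb1, hb2⟩ | ⟨h1', hb⟩
      · rw [if_neg (by omega)]
        exact Or.inl ⟨h2, hb1, hb2⟩
      · rw [if_pos (by omega)]
        exact Or.inr ⟨by simp, hb⟩

theorem pvMain (m : Int) (hm : 0 < m) : ∀ (F : Nat) (q : List (Int × Int)), q ≠ [] →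
    pvFuel q ≤ F →
    ((q ++ pvTail m F q).getLast?).map Prod.fst = some ((q.foldl (pvStepB m) (0, 0)).2) := by
  intro F
  induction F using Nat.strong_induction_on with
  | _ F IH =>
    intro q hq hfuel
    by_cases hnr : pvNext m q = []
    · have hall : ∀ x ∈ q, x.2 ≤ m := by
        intro x hx
        by_contra hgt
        have hnone := (List.filterMap_eq_nil_iff.mp hnr) x hx
        rw [if_pos (by omega)] at hnone
        exact Option.some_ne_none _ hnone
      rw [pvTail_nil m q F hall, List.append_nil,
        List.getLast?_eq_some_getLast hq,
        pvFold_all_one m hm q (0, 0) hq hall (by norm_num)]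
      simp
    · have hlenq : q.length ≤ pvFuel q := Nat.le_add_right _ _
      have hF : F = q.length + (F - q.length) := by omega
      rw [hF]
      have hrw := pvTail_round m q [] (F - q.length)
      simp only [List.append_nil, List.nil_append] at hrw
      rw [hrw, List.getLast?_append_of_ne_nil q (by simp [hnr]),
        IH (F - q.length) (by have := List.length_pos_of_ne_nil hq; omega) (pvNext m q) hnr
          (by have := pvFuel_inv m hm q; omega)]
      congr 1
      have hrel := pvFold_next m hm q (0, 0) (0, 0) (Or.inr ⟨by norm_num, rfl⟩)
      rcases hrel with ⟨_, _, h2⟩ | ⟨_, heq⟩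
      · exact h2
      · have hge := pvFold_fst_ge_one m (pvNext m q) (0, 0) hnr
        rw [heq] at hge
        norm_num at hge

theorem pvNewLine (line : List Int) :
    (PySem.List.pyRange 0 line.length 1).foldl
      (fun acc i => acc ++ [(i + 1, PySem.List.pyGetD line i 0)]) []
    = PySem.List.enumerate line 1 := by
  rw [PySem.List.foldl_append_singleton_eq_map]
  have hshift : ∀ (xs : List Int) (s : Int),
      PySem.List.enumerate xs (s + 1) = (PySem.List.enumerate xs s).map (fun p => (p.1 + 1, p.2)) := by
    intro xs
    induction xs with
    | nil => intro s; simp [PySem.List.enumerate_nil]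
    | cons x t IH =>
      intro s
      rw [PySem.List.enumerate_cons, PySem.List.enumerate_cons, List.map_cons,
        show s + 1 + 1 = (s + 1) + 1 from rfl, IH (s + 1)]
  have h0 := PySem.List.enumerate_eq_map_pyRange (xs := line) (d := 0)
  rw [show (1 : Int) = 0 + 1 from rfl, hshift line 0, h0, List.map_map]
  rfl

-- ===== VERDICT (by name: the statement is the Claim_ definition above) =====
theorem last_child_spec : Claim_equal_last_child := by
  intro n m line hdom hpre
  obtain ⟨hne, hm⟩ := hpre
  unfold Spec_last_child last_child_alt
  simp only [last_child]
  rw [pvNewLine line]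
  have hqne : PySem.List.enumerate line 1 ≠ [] := by
    intro h0
    have hl := PySem.List.length_enumerate (xs := line) (s := (1 : Int))
    rw [h0] at hl
    exact hne (List.length_eq_zero_iff.mp hl.symm)
  rw [pvLoopA_eq_tail m _ (PySem.List.enumerate line 1).toArray 0 (Nat.zero_le _)]
  simp only [List.drop_zero]
  rw [PySem.List.pyGet?_neg_one]
  rw [show (PySem.List.enumerate line 1).length +
      (List.map (fun x => x.2.toNat) (PySem.List.enumerate line 1)).sum
      = pvFuel (PySem.List.enumerate line 1) from rfl]
  have hget := pvMain m hm (pvFuel (PySem.List.enumerate line 1)) (PySem.List.enumerate line 1)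
    hqne (le_refl _)
  cases hL : ((PySem.List.enumerate line 1 ++
      pvTail m (pvFuel (PySem.List.enumerate line 1)) (PySem.List.enumerate line 1)).getLast?) with
  | none => rw [hL] at hget; simp at hget
  | some p =>
    rw [hL] at hget
    simp only [Option.map_some, Option.some.injEq] at hget
    rw [Option.getD_some]
    exact hget
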